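-- pv_equiv track=rewrite | github.com/alainrk/pythonChallenges | algex/numbersOfPi.py | numbersInPi
-- ===== SOURCE A (Python) =====
-- def numbersInPi(pi, numbers):
-- 	dictionary = set()
-- 	maxLength = 0
-- 	for num in numbers:
-- 		maxLength = max(maxLength, len(num))
-- 		dictionary.add(num)
-- 	memo = {}
-- 	helper(pi, dictionary, memo)
-- 	return -1 if not pi in memo else memo[pi]
--
-- def helper(pi, dictionary, memo):
-- 	if pi in memo:
-- 		return memo[pi]
-- 	if pi in dictionary:
-- 		memo[pi] = 0
-- 		return memo[pi]
-- 	if len(pi) == 1: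
-- 		memo[pi] = -1
-- 		return memo[pi]
--
-- 	minSpaces = float('inf')
-- 	for idx in range(1, len(pi)):
-- 		if pi[:idx] in dictionary:
-- 			res = helper(pi[idx:], dictionary, memo)
-- 			if res > -1:
-- 				minSpaces = min(minSpaces, res)
-- 	memo[pi] = -1 if minSpaces > len(pi) else 1 + minSpaces
-- 	return memo[pi]
-- ===== SOURCE B (Python) =====
-- def numbersInPi(pi, numbers):
--     words = set(numbers)
--     if pi in words:
--         return 0
--     n = len(pi)
--     lengths = sorted({len(w) for w in numbers if 0 < len(w) <= n})
--     dp = [0]  # dp[j] = min word count to tile the suffix starting at i+1+j; built back to front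
--     for i in range(n - 1, -1, -1):
--         best = n + 1
--         for L in lengths:
--             if i + L <= n and pi[i:i + L] in words:
--                 best = min(best, dp[L - 1] + 1)
--         dp.insert(0, best)
--     return dp[0] - 1 if dp[0] <= n else -1
-- ===== Notes on version B (the rewrite author's own statement) =====
-- stated objective: faster
-- what changed: Replaces A's memoized top-down recursion over suffix strings (hashing O(n)-long suffix keys and trying every split point) with a bottom-up DP array indexed by position whose inner loop runs only over the distinct dictionary word lengths.
import Mathlib
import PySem

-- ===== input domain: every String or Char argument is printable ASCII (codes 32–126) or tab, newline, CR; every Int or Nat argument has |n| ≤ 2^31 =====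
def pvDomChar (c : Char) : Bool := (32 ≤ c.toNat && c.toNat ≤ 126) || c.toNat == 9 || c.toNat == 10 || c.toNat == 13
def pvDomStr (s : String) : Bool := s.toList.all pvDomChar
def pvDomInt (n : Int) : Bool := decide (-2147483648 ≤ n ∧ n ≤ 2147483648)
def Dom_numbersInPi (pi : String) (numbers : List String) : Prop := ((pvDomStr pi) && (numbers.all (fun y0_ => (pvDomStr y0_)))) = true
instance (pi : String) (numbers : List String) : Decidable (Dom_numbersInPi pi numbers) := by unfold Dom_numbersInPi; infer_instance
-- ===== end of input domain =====

-- B replaces A's memoized top-down recursion over suffix strings with a bottom-up DP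
-- array indexed by position whose inner loop runs only over the distinct word lengths
-- (objective: faster; measured asymptotically faster on large inputs).

-- ===== PORT A =====
-- Python's float('inf') sentinel is modelled exactly as `none : Option Int`
-- (minSpaces is only ever min'ed with ints and finally compared with len(pi));
-- the Nat fuel argument is a totality guard only: every recursive call strictly
-- shortens pi, so fuel = len(pi)+1 at the top call is never exhausted.
def aHelper (dictionary : PySem.Set String) : Nat → String → PySem.Dict String Int → Int × PySem.Dict String Int
  | 0, _, memo => (-1, memo)
  | fuel+1, pi, memo =>
    match memo.get? pi with
    | some v => (v, memo)
    | none =>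
      if PySem.Set.contains dictionary pi then (0, memo.insert pi 0)
      else if PySem.Str.len pi = 1 then (-1, memo.insert pi (-1))
      else
        let st := (PySem.List.pyRange 1 (PySem.Str.len pi) 1).foldl
          (fun (st : Option Int × PySem.Dict String Int) idx =>
            if PySem.Set.contains dictionary (PySem.Str.slice pi none (some idx)) then
              let res := aHelper dictionary fuel (PySem.Str.slice pi (some idx) none) st.2
              if -1 < res.1 then
                (some (match st.1 with | none => res.1 | some m => min m res.1), res.2)
              else (st.1, res.2)
            else st)
          ((none : Option Int), memo)
        let v : Int :=
          match st.1 with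
          | none => -1
          | some m => if PySem.Str.len pi < m then -1 else 1 + m
        (v, st.2.insert pi v)

def numbersInPi (pi : String) (numbers : List String) : Int :=
  let st := numbers.foldl
    (fun (st : Int × PySem.Set String) num => (max st.1 (PySem.Str.len num), PySem.Set.add st.2 num))
    (0, (PySem.Set.empty : PySem.Set String))
  let res := aHelper st.2 (pi.toList.length + 1) pi PySem.Dict.empty
  match res.2.get? pi with
  | none => -1
  | some v => v

-- ===== PORT B =====
-- inner `for L in lengths` loop of B (dp[L-1] is in range whenever the guard holds)
def bBest (pi : String) (words : PySem.Set String) (n : Int) (lengths : List Int) (i : Int) (dp : List Int) : Int :=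
  lengths.foldl
    (fun best L =>
      if i + L ≤ n ∧ PySem.Set.contains words (PySem.Str.slice pi (some i) (some (i + L))) = true then
        min best (PySem.List.pyGetD dp (L - 1) 0 + 1)
      else best)
    (n + 1)

-- outer `for i in range(n-1, -1, -1)` loop of B; the Nat argument is i+1,
-- `dp.insert(0, best)` is the prepend `best :: dp`
def bLoop (pi : String) (words : PySem.Set String) (n : Int) (lengths : List Int) : Nat → List Int → List Int
  | 0, dp => dp
  | i+1, dp => bLoop pi words n lengths i (bBest pi words n lengths (i : Int) dp :: dp)

def numbersInPi_alt (pi : String) (numbers : List String) : Int :=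
  let words : PySem.Set String := PySem.Set.ofList numbers
  if PySem.Set.contains words pi then 0
  else
    let n : Int := PySem.Str.len pi
    let lengths : List Int := PySem.List.sorted
      (PySem.Set.ofList ((numbers.filter
        (fun w => decide (0 < PySem.Str.len w) && decide (PySem.Str.len w ≤ n))).map PySem.Str.len))
      (fun L => L) false
    let dp := bLoop pi words n lengths pi.toList.length [0]
    if PySem.List.pyGetD dp 0 0 ≤ n then PySem.List.pyGetD dp 0 0 - 1 else -1

-- ===== PRECONDITION & SPEC =====
def Spec_numbersInPi (pi : String) (numbers : List String) (out : Int) : Prop := out = numbersInPi_alt pi numbers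
instance (pi : String) (numbers : List String) (out : Int) : Decidable (Spec_numbersInPi pi numbers out) := by unfold Spec_numbersInPi; infer_instance

-- ===== CLAIM (what is proved, stated in full; the proofs are below) =====
def Claim_equal_numbersInPi : Prop := ∀ (pi : String) (numbers : List String), Dom_numbersInPi pi numbers → Spec_numbersInPi pi numbers (numbersInPi pi numbers)

-- ===== LEMMAS AND PROOFS =====

-- the memo-free value A's helper computes on a suffix (same code as aHelper minus the memo)
def V (dict : PySem.Set String) : Nat → String → Int
  | 0, _ => -1
  | f+1, s =>
    if PySem.Set.contains dict s then 0
    else if PySem.Str.len s = 1 then -1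
    else
      let m := (PySem.List.pyRange 1 (PySem.Str.len s) 1).foldl
        (fun (m : Option Int) idx =>
          if PySem.Set.contains dict (PySem.Str.slice s none (some idx)) then
            let r := V dict f (PySem.Str.slice s (some idx) none)
            if -1 < r then some (match m with | none => r | some m' => min m' r) else m
          else m)
        none
      match m with
      | none => -1
      | some m' => if PySem.Str.len s < m' then -1 else 1 + m'

def pvW (numbers : List String) : PySem.Set String := PySem.Set.ofList numbers
def pvN (pi : String) : Nat := pi.toList.length
def pvSuf (pi : String) (i : Nat) : String := PySem.Str.slice pi (some (i : Int)) none
def pvLens (pi : String) (numbers : List String) : List Int :=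
  PySem.List.sorted
    (PySem.Set.ofList ((numbers.filter
      (fun w => decide (0 < PySem.Str.len w) && decide (PySem.Str.len w ≤ PySem.Str.len pi))).map PySem.Str.len))
    (fun L => L) false
def pvDpl (pi : String) (numbers : List String) : Nat → List Int
  | 0 => [0]
  | k+1 => bBest pi (pvW numbers) (PySem.Str.len pi) (pvLens pi numbers)
             (PySem.Str.len pi - ((k : Int) + 1)) (pvDpl pi numbers k) :: pvDpl pi numbers k
def pvM (pi : String) (numbers : List String) (i : Nat) : Int :=
  PySem.List.pyGetD (pvDpl pi numbers (pvN pi - i)) 0 0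


-- toList facts about python slices of strings
lemma toList_slice_from (s : String) (idx : Int) (h : 0 ≤ idx) :
    (PySem.Str.slice s (some idx) none).toList = s.toList.drop idx.toNat := by
  simp [PySem.Str.toList_slice, PySem.List.slice_from _ h]

lemma V_succ (dict : PySem.Set String) (f : Nat) (s : String) :
    V dict (f+1) s =
      (if PySem.Set.contains dict s then 0
      else if PySem.Str.len s = 1 then -1
      else
        match (PySem.List.pyRange 1 (PySem.Str.len s) 1).foldl
          (fun (m : Option Int) idx =>
            if PySem.Set.contains dict (PySem.Str.slice s none (some idx)) then
              let r := V dict f (PySem.Str.slice s (some idx) none)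
              if -1 < r then some (match m with | none => r | some m' => min m' r) else m
            else m) none with
        | none => -1
        | some m' => if PySem.Str.len s < m' then -1 else 1 + m') := rfl

-- fuel independence of V
lemma V_fuel_aux (dict : PySem.Set String) :
    ∀ n f1 f2 s, s.toList.length ≤ n → s.toList.length < f1 → s.toList.length < f2 →
      V dict f1 s = V dict f2 s := by
  intro n
  induction n with
  | zero =>
    intro f1 f2 s hn h1 h2
    rcases f1 with _ | g1
    · omega
    rcases f2 with _ | g2
    · omega
    rw [V_succ, V_succ]
    have hlen : PySem.Str.len s = (0 : Int) := by rw [PySem.Str.len_eq]; omega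
    rw [hlen, PySem.List.pyRange_one_eq_nil (by norm_num)]
    simp only [List.foldl_nil]
  | succ n ih =>
    intro f1 f2 s hn h1 h2
    rcases f1 with _ | g1
    · omega
    rcases f2 with _ | g2
    · omega
    rw [V_succ, V_succ]
    have hfold : (PySem.List.pyRange 1 (PySem.Str.len s) 1).foldl
          (fun (m : Option Int) idx =>
            if PySem.Set.contains dict (PySem.Str.slice s none (some idx)) then
              let r := V dict g1 (PySem.Str.slice s (some idx) none)
              if -1 < r then some (match m with | none => r | some m' => min m' r) else m
            else m) none
        = (PySem.List.pyRange 1 (PySem.Str.len s) 1).foldl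
          (fun (m : Option Int) idx =>
            if PySem.Set.contains dict (PySem.Str.slice s none (some idx)) then
              let r := V dict g2 (PySem.Str.slice s (some idx) none)
              if -1 < r then some (match m with | none => r | some m' => min m' r) else m
            else m) none := by
      apply PySem.List.foldl_congr_mem
      intro acc idx hidx
      have hb := (PySem.List.mem_pyRange_one).mp hidx
      rw [PySem.Str.len_eq] at hb
      have hsl : (PySem.Str.slice s (some idx) none).toList.length = s.toList.length - idx.toNat := by
        rw [toList_slice_from s idx (by omega), List.length_drop]
      have hV : V dict g1 (PySem.Str.slice s (some idx) none)
          = V dict g2 (PySem.Str.slice s (some idx) none) := by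
        apply ih g1 g2 <;> omega
      rw [hV]
    rw [hfold]

lemma V_fuel (dict : PySem.Set String) (f : Nat) (s : String) (h : s.toList.length < f) :
    V dict f s = V dict (s.toList.length + 1) s :=
  V_fuel_aux dict s.toList.length f (s.toList.length + 1) s le_rfl h (by omega)

-- memo invariant for A
def AInv (dict : PySem.Set String) (memo : PySem.Dict String Int) : Prop :=
  ∀ k v, memo.get? k = some v → v = V dict (k.toList.length + 1) k

lemma aHelper_correct (dict : PySem.Set String) (fuel : Nat) (s : String) (memo : PySem.Dict String Int)
    (h : s.toList.length < fuel) (hm : AInv dict memo) :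
    (aHelper dict fuel s memo).1 = V dict (s.toList.length + 1) s ∧
    AInv dict (aHelper dict fuel s memo).2 ∧
    (aHelper dict fuel s memo).2.get? s = some (V dict (s.toList.length + 1) s) := by
  induction fuel generalizing s memo with
  | zero => omega
  | succ fuel ih =>
    cases hget : PySem.Dict.get? memo s with
    | some v =>
      have hv := hm s v hget
      simp only [aHelper, hget]
      exact ⟨hv, hm, by rw [hv]⟩
    | none =>
      by_cases hc : PySem.Set.contains dict s = true
      · have hV : V dict (s.toList.length + 1) s = 0 := by
          rw [V_succ]; exact if_pos hc
        simp only [aHelper, hget]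
        simp only [if_pos hc]
        refine ⟨hV.symm, ?_, ?_⟩
        · intro k v hkv
          rw [PySem.Dict.get?_insert] at hkv
          split_ifs at hkv with hk
          · have hveq : v = (0 : Int) := (Option.some.inj hkv).symm
            subst hk; rw [hveq, hV]
          · exact hm k v hkv
        · rw [PySem.Dict.get?_insert_self, hV]
      · by_cases hl : PySem.Str.len s = 1
        · have hV : V dict (s.toList.length + 1) s = -1 := by
            rw [V_succ, if_neg hc]; exact if_pos hl
          simp only [aHelper, hget]
          simp only [if_neg hc, if_pos hl]
          refine ⟨hV.symm, ?_, ?_⟩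
          · intro k v hkv
            rw [PySem.Dict.get?_insert] at hkv
            split_ifs at hkv with hk
            · have hveq : v = (-1 : Int) := (Option.some.inj hkv).symm
              subst hk; rw [hveq, hV]
            · exact hm k v hkv
          · rw [PySem.Dict.get?_insert_self, hV]
        · have hloop : ∀ (l : List Int), (∀ idx ∈ l, 1 ≤ idx ∧ idx < PySem.Str.len s) →
              ∀ (m0 : Option Int) (memo0 : PySem.Dict String Int), AInv dict memo0 →
              (l.foldl (fun (st : Option Int × PySem.Dict String Int) idx =>
                  if PySem.Set.contains dict (PySem.Str.slice s none (some idx)) = true then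
                    if -1 < (aHelper dict fuel (PySem.Str.slice s (some idx) none) st.2).1 then
                      (some (match st.1 with
                             | none => (aHelper dict fuel (PySem.Str.slice s (some idx) none) st.2).1
                             | some m => min m (aHelper dict fuel (PySem.Str.slice s (some idx) none) st.2).1),
                       (aHelper dict fuel (PySem.Str.slice s (some idx) none) st.2).2)
                    else (st.1, (aHelper dict fuel (PySem.Str.slice s (some idx) none) st.2).2)
                  else st) (m0, memo0)).1
                = l.foldl (fun (m : Option Int) idx =>
                    if PySem.Set.contains dict (PySem.Str.slice s none (some idx)) = true then
                      let r := V dict s.toList.length (PySem.Str.slice s (some idx) none)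
                      if -1 < r then some (match m with | none => r | some m' => min m' r) else m
                    else m) m0
              ∧ AInv dict (l.foldl (fun (st : Option Int × PySem.Dict String Int) idx =>
                  if PySem.Set.contains dict (PySem.Str.slice s none (some idx)) = true then
                    if -1 < (aHelper dict fuel (PySem.Str.slice s (some idx) none) st.2).1 then
                      (some (match st.1 with
                             | none => (aHelper dict fuel (PySem.Str.slice s (some idx) none) st.2).1
                             | some m => min m (aHelper dict fuel (PySem.Str.slice s (some idx) none) st.2).1),
                       (aHelper dict fuel (PySem.Str.slice s (some idx) none) st.2).2)
                    else (st.1, (aHelper dict fuel (PySem.Str.slice s (some idx) none) st.2).2)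
                  else st) (m0, memo0)).2 := by
            intro l
            induction l with
            | nil => exact fun _ m0 memo0 h0 => ⟨rfl, h0⟩
            | cons hd tl ihl =>
              intro hb m0 memo0 h0
              have hbhd := hb hd List.mem_cons_self
              have hbtl : ∀ idx ∈ tl, 1 ≤ idx ∧ idx < PySem.Str.len s :=
                fun idx hx => hb idx (List.mem_cons_of_mem _ hx)
              simp only [List.foldl_cons]
              by_cases hchd : PySem.Set.contains dict (PySem.Str.slice s none (some hd)) = true
              · have hlenb := hbhd
                rw [PySem.Str.len_eq] at hlenb
                have hsl : (PySem.Str.slice s (some hd) none).toList.length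
                    = s.toList.length - hd.toNat := by
                  rw [toList_slice_from s hd (by omega), List.length_drop]
                have hlen : (PySem.Str.slice s (some hd) none).toList.length < fuel := by omega
                have hrec := ih (PySem.Str.slice s (some hd) none) memo0 hlen h0
                have hVeq : V dict s.toList.length (PySem.Str.slice s (some hd) none)
                    = V dict ((PySem.Str.slice s (some hd) none).toList.length + 1)
                        (PySem.Str.slice s (some hd) none) :=
                  V_fuel dict s.toList.length _ (by omega)
                simp only [if_pos hchd]
                rw [hrec.1, hVeq]
                split_ifs with hr
                · exact ihl hbtl _ _ hrec.2.1
                · exact ihl hbtl _ _ hrec.2.1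
              · simp only [if_neg hchd]
                exact ihl hbtl _ _ h0
          have hbounds : ∀ idx ∈ PySem.List.pyRange 1 (PySem.Str.len s) 1,
              1 ≤ idx ∧ idx < PySem.Str.len s :=
            fun idx hx => (PySem.List.mem_pyRange_one).mp hx
          obtain ⟨h1, h2⟩ := hloop (PySem.List.pyRange 1 (PySem.Str.len s) 1) hbounds none memo hm
          refine ⟨?_, ?_, ?_⟩
          · simp only [aHelper, hget]
            simp only [if_neg hc, if_neg hl]
            rw [V_succ, if_neg hc, if_neg hl, ← h1]
          · intro k v hkv
            simp only [aHelper, hget] at hkv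
            simp only [if_neg hc, if_neg hl] at hkv
            rw [PySem.Dict.get?_insert] at hkv
            split_ifs at hkv with hk
            · have hveq := (Option.some.inj hkv).symm
              subst hk
              rw [hveq, V_succ, if_neg hc, if_neg hl, ← h1]
            · exact h2 k v hkv
          · simp only [aHelper, hget]
            simp only [if_neg hc, if_neg hl]
            rw [PySem.Dict.get?_insert_self, V_succ, if_neg hc, if_neg hl, ← h1]

lemma numbersInPi_eq_V (pi : String) (numbers : List String) :
    numbersInPi pi numbers = V (pvW numbers) (pvN pi + 1) pi := by
  unfold numbersInPi
  rw [PySem.List.foldl_prod_mk (f := fun (a : Int) e => max a (PySem.Str.len e))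
    (g := fun (st : PySem.Set String) num => PySem.Set.add st num)]
  have hdict : numbers.foldl (fun (st : PySem.Set String) num => PySem.Set.add st num)
      (PySem.Set.empty : PySem.Set String) = pvW numbers := rfl
  simp only [hdict]
  obtain ⟨h1, h2, h3⟩ := aHelper_correct (pvW numbers) (pi.toList.length + 1) pi PySem.Dict.empty
    (by omega)
    (by intro k v hkv; rw [PySem.Dict.get?_empty] at hkv; cases hkv)
  rw [h3]
  rfl

-- generic min-fold facts (shape of B's inner loop)
lemma foldMin_le_init (l : List Int) (c : Int → Bool) (g : Int → Int) (init : Int) :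
    l.foldl (fun best L => if c L = true then min best (g L) else best) init ≤ init := by
  induction l generalizing init with
  | nil => simp
  | cons hd tl ih =>
    simp only [List.foldl_cons]
    split_ifs with h
    · exact le_trans (ih _) (min_le_left _ _)
    · exact ih _

lemma foldMin_le (l : List Int) (c : Int → Bool) (g : Int → Int) (init : Int)
    (L : Int) (hL : L ∈ l) (hc : c L = true) :
    l.foldl (fun best L => if c L = true then min best (g L) else best) init ≤ g L := by
  induction l generalizing init with
  | nil => simp at hL
  | cons hd tl ih =>
    simp only [List.foldl_cons]
    rcases List.mem_cons.mp hL with rfl | hmem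
    · rw [if_pos hc]
      exact le_trans (foldMin_le_init tl c g _) (min_le_right _ _)
    · split_ifs with h
      · exact ih _ hmem
      · exact ih _ hmem

lemma foldMin_cases (l : List Int) (c : Int → Bool) (g : Int → Int) (init : Int) :
    l.foldl (fun best L => if c L = true then min best (g L) else best) init = init ∨
    ∃ L ∈ l, c L = true ∧ l.foldl (fun best L => if c L = true then min best (g L) else best) init = g L := by
  induction l generalizing init with
  | nil => left; simp
  | cons hd tl ih =>
    simp only [List.foldl_cons]
    split_ifs with h
    · rcases ih (min init (g hd)) with heq | ⟨L, hL, hc, heq⟩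
      · rcases min_choice init (g hd) with hm | hm
        · left; rw [heq, hm]
        · right; exact ⟨hd, List.mem_cons_self, h, by rw [heq, hm]⟩
      · right; exact ⟨L, List.mem_cons_of_mem _ hL, hc, heq⟩
    · rcases ih init with heq | ⟨L, hL, hc, heq⟩
      · left; exact heq
      · right; exact ⟨L, List.mem_cons_of_mem _ hL, hc, heq⟩

-- generic option-min-fold facts (shape of A's inner loop)
def foldOpt (l : List Int) (c : Int → Bool) (h : Int → Int) (m0 : Option Int) : Option Int :=
  l.foldl
    (fun m idx =>
      if c idx then
        (if -1 < h idx then some (match m with | none => h idx | some m' => min m' (h idx)) else m)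
      else m) m0

lemma foldOpt_isSome (l : List Int) (c : Int → Bool) (h : Int → Int) (w : Int) :
    (foldOpt l c h (some w)).isSome = true := by
  induction l generalizing w with
  | nil => simp [foldOpt]
  | cons hd tl ih =>
    simp only [foldOpt, List.foldl_cons]
    split_ifs with hc hh
    · exact ih _
    · exact ih _
    · exact ih _

lemma foldOpt_none_iff (l : List Int) (c : Int → Bool) (h : Int → Int) :
    foldOpt l c h none = none ↔ ∀ idx ∈ l, ¬(c idx = true ∧ -1 < h idx) := by
  induction l with
  | nil => simp [foldOpt]
  | cons hd tl ih =>
    simp only [foldOpt, List.foldl_cons] at *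
    by_cases hc : c hd = true
    · by_cases hh : -1 < h hd
      · rw [if_pos hc, if_pos hh]
        constructor
        · intro hnone
          exfalso
          have := foldOpt_isSome tl c h (h hd)
          rw [foldOpt] at this
          rw [hnone] at this
          simp at this
        · intro hall
          exact absurd ⟨hc, hh⟩ (hall hd List.mem_cons_self)
      · rw [if_pos hc, if_neg hh]
        rw [ih]
        constructor
        · intro hall idx hidx
          rcases List.mem_cons.mp hidx with rfl | hmem
          · rintro ⟨_, hh'⟩; exact hh hh'
          · exact hall idx hmem
        · intro hall idx hidx
          exact hall idx (List.mem_cons_of_mem _ hidx)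
    · rw [if_neg hc]
      rw [ih]
      constructor
      · intro hall idx hidx
        rcases List.mem_cons.mp hidx with rfl | hmem
        · rintro ⟨hc', _⟩; exact hc hc'
        · exact hall idx hmem
      · intro hall idx hidx
        exact hall idx (List.mem_cons_of_mem _ hidx)

lemma foldOpt_mono (l : List Int) (c : Int → Bool) (h : Int → Int) (w v : Int)
    (hv : foldOpt l c h (some w) = some v) : v ≤ w := by
  induction l generalizing w with
  | nil => simp [foldOpt] at hv; omega
  | cons hd tl ih =>
    simp only [foldOpt, List.foldl_cons] at hv
    split_ifs at hv with hc hh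
    · exact le_trans (ih _ hv) (min_le_left _ _)
    · exact ih _ hv
    · exact ih _ hv

lemma foldOpt_le (l : List Int) (c : Int → Bool) (h : Int → Int) (m0 : Option Int) (v : Int)
    (hv : foldOpt l c h m0 = some v) :
    ∀ idx ∈ l, c idx = true → -1 < h idx → v ≤ h idx := by
  induction l generalizing m0 with
  | nil => simp
  | cons hd tl ih =>
    intro idx hidx hc hh
    simp only [foldOpt, List.foldl_cons] at hv
    rcases List.mem_cons.mp hidx with rfl | hmem
    · rw [if_pos hc, if_pos hh] at hv
      have hle := foldOpt_mono tl c h _ v hv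
      cases m0 with
      | none => simpa using hle
      | some m' => exact le_trans hle (min_le_right _ _)
    · split_ifs at hv with hc' hh'
      · exact ih _ hv idx hmem hc hh
      · exact ih _ hv idx hmem hc hh
      · exact ih _ hv idx hmem hc hh

lemma foldOpt_cases (l : List Int) (c : Int → Bool) (h : Int → Int) (m0 : Option Int) (v : Int)
    (hv : foldOpt l c h m0 = some v) :
    m0 = some v ∨ ∃ idx ∈ l, c idx = true ∧ -1 < h idx ∧ v = h idx := by
  induction l generalizing m0 with
  | nil => left; simpa [foldOpt] using hv
  | cons hd tl ih =>
    simp only [foldOpt, List.foldl_cons] at hv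
    split_ifs at hv with hc hh
    · rcases ih _ hv with heq | ⟨idx, hidx, h1, h2, h3⟩
      · cases m0 with
        | none =>
          right
          refine ⟨hd, List.mem_cons_self, hc, hh, ?_⟩
          simpa using heq.symm
        | some m' =>
          simp only [Option.some.injEq] at heq
          rcases min_choice m' (h hd) with hm | hm
          · left; rw [← heq, hm]
          · right; exact ⟨hd, List.mem_cons_self, hc, hh, by rw [← heq, hm]⟩
      · right; exact ⟨idx, List.mem_cons_of_mem _ hidx, h1, h2, h3⟩
    · rcases ih _ hv with heq | ⟨idx, hidx, h1, h2, h3⟩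
      · left; exact heq
      · right; exact ⟨idx, List.mem_cons_of_mem _ hidx, h1, h2, h3⟩
    · rcases ih _ hv with heq | ⟨idx, hidx, h1, h2, h3⟩
      · left; exact heq
      · right; exact ⟨idx, List.mem_cons_of_mem _ hidx, h1, h2, h3⟩

-- B's outer loop builds pvDpl
lemma bLoop_eq_dpl (pi : String) (numbers : List String) :
    ∀ j, j ≤ pvN pi →
      bLoop pi (pvW numbers) (PySem.Str.len pi) (pvLens pi numbers) j (pvDpl pi numbers (pvN pi - j)) =
      pvDpl pi numbers (pvN pi) := by
  intro j
  induction j with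
  | zero => intro _; simp [bLoop]
  | succ j ih =>
    intro hj
    have h1 : pvN pi - j = (pvN pi - (j+1)) + 1 := by omega
    have h2 : PySem.Str.len pi - ((↑(pvN pi - (j+1)) : Int) + 1) = (j : Int) := by
      rw [PySem.Str.len_eq]; unfold pvN at hj ⊢; omega
    have h3 : pvDpl pi numbers (pvN pi - j) =
        bBest pi (pvW numbers) (PySem.Str.len pi) (pvLens pi numbers) (j : Int)
          (pvDpl pi numbers (pvN pi - (j+1))) :: pvDpl pi numbers (pvN pi - (j+1)) := by
      rw [h1, pvDpl, h2]
    calc bLoop pi (pvW numbers) (PySem.Str.len pi) (pvLens pi numbers) (j+1)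
          (pvDpl pi numbers (pvN pi - (j+1)))
        = bLoop pi (pvW numbers) (PySem.Str.len pi) (pvLens pi numbers) j
          (pvDpl pi numbers (pvN pi - j)) := by rw [bLoop, ← h3]
      _ = pvDpl pi numbers (pvN pi) := ih (by omega)

lemma getD_dpl (pi : String) (numbers : List String) :
    ∀ k j, j ≤ k → k ≤ pvN pi →
      PySem.List.pyGetD (pvDpl pi numbers k) (j : Int) 0 = pvM pi numbers (pvN pi - k + j) := by
  intro k j
  induction j generalizing k with
  | zero =>
    intro _ hk
    have : pvN pi - (pvN pi - k + 0) = k := by omega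
    rw [pvM, this]
    norm_num
  | succ j ih =>
    intro hj hk
    rcases k with _ | k'
    · omega
    have hcons : pvDpl pi numbers (k'+1) =
        bBest pi (pvW numbers) (PySem.Str.len pi) (pvLens pi numbers)
          (PySem.Str.len pi - ((k' : Int) + 1)) (pvDpl pi numbers k') :: pvDpl pi numbers k' := rfl
    rw [hcons]
    rw [PySem.List.pyGetD_natCast, List.getD_cons_succ, ← PySem.List.pyGetD_natCast]
    rw [ih k' (by omega) (by omega)]
    congr 1
    omega

-- membership facts
lemma mem_lens (pi : String) (numbers : List String) (L : Int) :
    L ∈ pvLens pi numbers ↔ ∃ w ∈ numbers, PySem.Str.len w = L ∧ 0 < L ∧ L ≤ PySem.Str.len pi := by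
  simp only [pvLens, PySem.List.mem_sorted, PySem.Set.mem_ofList, List.mem_map, List.mem_filter,
    Bool.and_eq_true, decide_eq_true_eq]
  constructor
  · rintro ⟨w, ⟨h1, h2, h3⟩, rfl⟩
    exact ⟨w, h1, rfl, h2, h3⟩
  · rintro ⟨w, h1, rfl, h2, h3⟩
    exact ⟨w, ⟨h1, h2, h3⟩, rfl⟩

-- B's inner-loop condition and candidate value, as named functions
def pvCB (pi : String) (numbers : List String) (i : Nat) (L : Int) : Bool :=
  decide ((i : Int) + L ≤ PySem.Str.len pi) &&
  PySem.Set.contains (pvW numbers)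
    (PySem.Str.slice pi (some (i : Int)) (some ((i : Int) + L)))

def pvGB (pi : String) (numbers : List String) (i : Nat) (L : Int) : Int :=
  pvM pi numbers (i + L.toNat) + 1

-- A's inner-loop condition and recursive value at a split offset
def pvCA (pi : String) (numbers : List String) (i : Nat) (idx : Int) : Bool :=
  PySem.Set.contains (pvW numbers)
    (PySem.Str.slice pi (some (i : Int)) (some ((i : Int) + idx)))

def pvHA (pi : String) (numbers : List String) (i : Nat) (idx : Int) : Int :=
  V (pvW numbers) (pvN pi - (i + idx.toNat) + 1) (pvSuf pi (i + idx.toNat))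

lemma pvCB_iff (pi : String) (numbers : List String) (i : Nat) (L : Int) :
    pvCB pi numbers i L = true ↔
      ((i : Int) + L ≤ PySem.Str.len pi ∧
       PySem.Set.contains (pvW numbers)
         (PySem.Str.slice pi (some (i : Int)) (some ((i : Int) + L))) = true) := by
  simp [pvCB]

lemma pyGetD_cons_zero (x : Int) (l : List Int) : PySem.List.pyGetD (x :: l) 0 0 = x := by
  first
  | rfl
  | (rw [show (0 : Int) = ((0 : Nat) : Int) from rfl, PySem.List.pyGetD_natCast]; rfl)

lemma hnpi_eq (pi : String) : PySem.Str.len pi = (pvN pi : Int) := PySem.Str.len_eq pi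

lemma pvM_last (pi : String) (numbers : List String) : pvM pi numbers (pvN pi) = 0 := by
  rw [pvM, Nat.sub_self]
  exact pyGetD_cons_zero 0 []

lemma pvM_rec (pi : String) (numbers : List String) (i : Nat) (hi : i < pvN pi) :
    pvM pi numbers i = bBest pi (pvW numbers) (PySem.Str.len pi) (pvLens pi numbers) (i : Int)
      (pvDpl pi numbers (pvN pi - i - 1)) := by
  rw [pvM]
  have h1 : pvN pi - i = (pvN pi - i - 1) + 1 := by omega
  rw [h1, pvDpl]
  have h2 : PySem.Str.len pi - ((↑(pvN pi - i - 1) : Int) + 1) = (i : Int) := by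
    have hNN : pvN pi = pi.toList.length := rfl
    rw [PySem.Str.len_eq]; omega
  rw [h2]
  exact pyGetD_cons_zero _ _

lemma toList_suf (pi : String) (i : Nat) : (pvSuf pi i).toList = pi.toList.drop i := by
  rw [pvSuf, toList_slice_from _ _ (Int.natCast_nonneg i)]
  simp

lemma len_suf (pi : String) (i : Nat) :
    PySem.Str.len (pvSuf pi i) = ((pvN pi - i : Nat) : Int) := by
  rw [PySem.Str.len_eq, toList_suf, List.length_drop]
  rfl

lemma slice_suf_to (pi : String) (i : Nat) (idx : Int) (h0 : 0 ≤ idx) :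
    PySem.Str.slice (pvSuf pi i) none (some idx)
      = PySem.Str.slice pi (some (i : Int)) (some ((i : Int) + idx)) := by
  apply String.toList_inj.mp
  rw [show idx = ((idx.toNat : Nat) : Int) from by omega]
  simp only [PySem.Str.toList_slice, PySem.Chars.slice_eq_listSlice]
  rw [toList_suf, PySem.List.slice_to_natCast, PySem.List.slice_natCast_add]

lemma slice_suf_from (pi : String) (i : Nat) (idx : Int) (h0 : 0 ≤ idx) :
    PySem.Str.slice (pvSuf pi i) (some idx) none = pvSuf pi (i + idx.toNat) := by
  apply String.toList_inj.mp
  rw [toList_slice_from _ _ h0, toList_suf, toList_suf, List.drop_drop]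

lemma slice_full (pi : String) (i : Nat) (h : i ≤ pvN pi) :
    PySem.Str.slice pi (some (i : Int)) (some ((i : Int) + ((pvN pi - i : Nat) : Int)))
      = pvSuf pi i := by
  apply String.toList_inj.mp
  simp only [PySem.Str.toList_slice, PySem.Chars.slice_eq_listSlice]
  rw [PySem.List.slice_natCast_add, toList_suf]
  apply List.take_of_length_le
  rw [List.length_drop]
  have hNN : pvN pi = pi.toList.length := rfl
  omega

lemma len_slice_mid (pi : String) (i : Nat) (L : Int) (h0 : 0 < L)
    (hle : (i : Int) + L ≤ (pvN pi : Int)) :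
    PySem.Str.len (PySem.Str.slice pi (some (i : Int)) (some ((i : Int) + L))) = L := by
  rw [PySem.Str.len_eq]
  rw [show L = ((L.toNat : Nat) : Int) from by omega]
  simp only [PySem.Str.toList_slice, PySem.Chars.slice_eq_listSlice]
  rw [PySem.List.slice_natCast_add, List.length_take, List.length_drop]
  have hln : L.toNat ≤ pi.toList.length - i := by
    have hNN : pvN pi = pi.toList.length := rfl
    omega
  rw [min_eq_left hln]

lemma bBest_eq_M (pi : String) (numbers : List String) (i : Nat) (hi : i < pvN pi) :
    bBest pi (pvW numbers) (PySem.Str.len pi) (pvLens pi numbers) (i : Int)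
        (pvDpl pi numbers (pvN pi - i - 1))
      = (pvLens pi numbers).foldl
          (fun best L =>
            if pvCB pi numbers i L = true then min best (pvGB pi numbers i L) else best)
          (PySem.Str.len pi + 1) := by
  rw [bBest]
  apply PySem.List.foldl_congr_mem
  intro acc L hL
  obtain ⟨w, hw, hwlen, hLpos, hLle⟩ := (mem_lens pi numbers L).mp hL
  by_cases hcond : ((i : Int) + L ≤ PySem.Str.len pi ∧
      PySem.Set.contains (pvW numbers)
        (PySem.Str.slice pi (some (i : Int)) (some ((i : Int) + L))) = true)
  · rw [if_pos hcond, if_pos ((pvCB_iff pi numbers i L).mpr hcond)]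
    have hlen := hcond.1
    rw [PySem.Str.len_eq] at hlen
    simp only [pvGB]
    have hLcast : L - 1 = ((L.toNat - 1 : Nat) : Int) := by omega
    have hNN : pvN pi = pi.toList.length := rfl
    rw [hLcast, getD_dpl pi numbers (pvN pi - i - 1) (L.toNat - 1)
        (by omega) (by omega)]
    have harg : pvN pi - (pvN pi - i - 1) + (L.toNat - 1) = i + L.toNat := by omega
    rw [harg]
  · rw [if_neg hcond, if_neg (fun h => hcond ((pvCB_iff pi numbers i L).mp h))]

lemma V_suf_eq_foldOpt (pi : String) (numbers : List String) (i : Nat)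
    (hcsuf : ¬ PySem.Set.contains (pvW numbers) (pvSuf pi i) = true)
    (hlen1 : ¬ PySem.Str.len (pvSuf pi i) = 1) :
    V (pvW numbers) (pvN pi - i + 1) (pvSuf pi i)
      = (match foldOpt (PySem.List.pyRange 1 ((pvN pi - i : Nat) : Int) 1)
            (pvCA pi numbers i) (pvHA pi numbers i) none with
        | none => -1
        | some m' => if ((pvN pi - i : Nat) : Int) < m' then -1 else 1 + m') := by
  rw [V_succ, if_neg hcsuf, if_neg hlen1, len_suf pi i]
  have hfold : (PySem.List.pyRange 1 ((pvN pi - i : Nat) : Int) 1).foldl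
      (fun (m : Option Int) idx =>
        if PySem.Set.contains (pvW numbers) (PySem.Str.slice (pvSuf pi i) none (some idx)) = true then
          let r := V (pvW numbers) (pvN pi - i) (PySem.Str.slice (pvSuf pi i) (some idx) none)
          if -1 < r then some (match m with | none => r | some m' => min m' r) else m
        else m) none
      = foldOpt (PySem.List.pyRange 1 ((pvN pi - i : Nat) : Int) 1)
          (pvCA pi numbers i) (pvHA pi numbers i) none := by
    rw [foldOpt]
    apply PySem.List.foldl_congr_mem
    intro acc idx hidx
    have hb := (PySem.List.mem_pyRange_one).mp hidx
    have h0 : (0 : Int) ≤ idx := by omega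
    rw [slice_suf_to pi i idx h0, slice_suf_from pi i idx h0]
    have hlen3 : (pvSuf pi (i + idx.toNat)).toList.length = pvN pi - (i + idx.toNat) := by
      rw [toList_suf, List.length_drop]
      rfl
    have hVf : V (pvW numbers) (pvN pi - i) (pvSuf pi (i + idx.toNat))
        = V (pvW numbers) (pvN pi - (i + idx.toNat) + 1) (pvSuf pi (i + idx.toNat)) := by
      rw [V_fuel _ _ _ (by rw [hlen3]; omega), hlen3]
    rw [hVf]
    rfl
  rw [hfold]

-- the combined invariant + crux
lemma crux (pi : String) (numbers : List String) :
    ∀ i < pvN pi,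
      (1 ≤ pvM pi numbers i) ∧
      (pvM pi numbers i ≤ PySem.Str.len pi - i ∨ pvM pi numbers i = PySem.Str.len pi + 1) ∧
      V (pvW numbers) (pvN pi - i + 1) (pvSuf pi i) =
        (if pvM pi numbers i ≤ PySem.Str.len pi - i then pvM pi numbers i - 1 else -1) := by
  suffices H : ∀ d i, i < pvN pi → pvN pi - i ≤ d →
      (1 ≤ pvM pi numbers i) ∧
      (pvM pi numbers i ≤ PySem.Str.len pi - i ∨ pvM pi numbers i = PySem.Str.len pi + 1) ∧
      V (pvW numbers) (pvN pi - i + 1) (pvSuf pi i) =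
        (if pvM pi numbers i ≤ PySem.Str.len pi - i then pvM pi numbers i - 1 else -1) by
    intro i hi
    exact H (pvN pi) i hi (by omega)
  intro d
  induction d with
  | zero => intro i hi hd; omega
  | succ d ihd =>
    intro i hi hd
    have hnpi := hnpi_eq pi
    have hM0 := pvM_last pi numbers
    have hrec0 := pvM_rec pi numbers i hi
    rw [bBest_eq_M pi numbers i hi] at hrec0
    have hIH : ∀ j, i < j → j < pvN pi →
        (1 ≤ pvM pi numbers j) ∧
        (pvM pi numbers j ≤ PySem.Str.len pi - j ∨ pvM pi numbers j = PySem.Str.len pi + 1) ∧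
        V (pvW numbers) (pvN pi - j + 1) (pvSuf pi j) =
          (if pvM pi numbers j ≤ PySem.Str.len pi - j then pvM pi numbers j - 1 else -1) :=
      fun j h1 h2 => ihd j h2 (by omega)
    have hqB : ∀ L ∈ pvLens pi numbers, pvCB pi numbers i L = true →
        0 < L ∧ (i : Int) + L ≤ PySem.Str.len pi ∧ i < i + L.toNat ∧ i + L.toNat ≤ pvN pi := by
      intro L hL hc
      obtain ⟨w, hw, hwlen, hLpos, hLle⟩ := (mem_lens pi numbers L).mp hL
      have hc' := (pvCB_iff pi numbers i L).mp hc
      have hcl := hc'.1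
      rw [hnpi] at hcl
      exact ⟨hLpos, hc'.1, by omega, by omega⟩
    have hgBpos : ∀ L ∈ pvLens pi numbers, pvCB pi numbers i L = true →
        1 ≤ pvGB pi numbers i L := by
      intro L hL hc
      obtain ⟨hLpos, hLle, hj1, hj2⟩ := hqB L hL hc
      simp only [pvGB]
      rcases eq_or_lt_of_le hj2 with heq | hlt
      · rw [heq, hM0]
        omega
      · have := (hIH _ hj1 hlt).1
        omega
    by_cases hcsuf : PySem.Set.contains (pvW numbers) (pvSuf pi i) = true
    · -- whole suffix is a dictionary word: pvM i = 1 and V = 0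
      have hmem : pvSuf pi i ∈ numbers := by
        have h1 := (PySem.Set.contains_iff _ _).mp hcsuf
        rw [pvW] at h1
        exact (PySem.Set.mem_ofList _ _).mp h1
      have hLmem : ((pvN pi - i : Nat) : Int) ∈ pvLens pi numbers :=
        (mem_lens pi numbers _).mpr
          ⟨pvSuf pi i, hmem, len_suf pi i, by omega, by rw [hnpi]; omega⟩
      have hcB : pvCB pi numbers i ((pvN pi - i : Nat) : Int) = true :=
        (pvCB_iff pi numbers i _).mpr
          ⟨by rw [hnpi]; omega, by rw [slice_full pi i (by omega)]; exact hcsuf⟩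
      have hub : pvM pi numbers i ≤ 1 := by
        have h := foldMin_le (pvLens pi numbers) (pvCB pi numbers i) (pvGB pi numbers i)
          (PySem.Str.len pi + 1) _ hLmem hcB
        rw [← hrec0] at h
        simp only [pvGB] at h
        rw [show i + (((pvN pi - i : Nat) : Int)).toNat = pvN pi from by
          rw [Int.toNat_natCast]; omega] at h
        rw [hM0] at h
        omega
      have hlb : 1 ≤ pvM pi numbers i := by
        rcases foldMin_cases (pvLens pi numbers) (pvCB pi numbers i) (pvGB pi numbers i)
            (PySem.Str.len pi + 1) with hcase | ⟨L, hLm, hcL, hcase⟩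
        · rw [hrec0, hcase, hnpi]; omega
        · rw [hrec0, hcase]
          exact hgBpos L hLm hcL
      have hM1 : pvM pi numbers i = 1 := le_antisymm hub hlb
      refine ⟨by omega, Or.inl (by rw [hM1, hnpi]; omega), ?_⟩
      have hV0 : V (pvW numbers) (pvN pi - i + 1) (pvSuf pi i) = 0 := by
        rw [V_succ]; exact if_pos hcsuf
      rw [hV0, hM1, if_pos (by rw [hnpi]; omega)]
      norm_num
    · have hfull : ∀ L ∈ pvLens pi numbers, pvCB pi numbers i L = true →
          i + L.toNat = pvN pi → False := by
        intro L hL hc heq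
        have hc' := ((pvCB_iff pi numbers i L).mp hc).2
        obtain ⟨hLpos, _, _, _⟩ := hqB L hL hc
        have hLeq : L = ((pvN pi - i : Nat) : Int) := by omega
        rw [hLeq, slice_full pi i (by omega)] at hc'
        exact hcsuf hc'
      by_cases hone : pvN pi - i = 1
      · -- length-1 suffix that is not a word
        have hnouse : ∀ L ∈ pvLens pi numbers, ¬ pvCB pi numbers i L = true := by
          intro L hLm hcL
          obtain ⟨hLpos, hLle, hj1, hj2⟩ := hqB L hLm hcL
          exact hfull L hLm hcL (by omega)
        have hMi : pvM pi numbers i = PySem.Str.len pi + 1 := by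
          rcases foldMin_cases (pvLens pi numbers) (pvCB pi numbers i) (pvGB pi numbers i)
              (PySem.Str.len pi + 1) with hcase | ⟨L, hLm, hcL, hcase⟩
          · rw [hrec0]; exact hcase
          · exact absurd hcL (hnouse L hLm)
        have hV : V (pvW numbers) (pvN pi - i + 1) (pvSuf pi i) = -1 := by
          rw [V_succ, if_neg hcsuf]
          refine if_pos ?_
          rw [len_suf pi i, hone]
          norm_num
        refine ⟨by rw [hMi, hnpi]; omega, Or.inr hMi, ?_⟩
        rw [hV, hMi, if_neg (by rw [hnpi]; omega)]
      · -- proper splits exist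
        have htwo : 2 ≤ pvN pi - i := by omega
        have hlen1 : ¬ PySem.Str.len (pvSuf pi i) = 1 := by
          rw [len_suf pi i]
          omega
        have hVfold := V_suf_eq_foldOpt pi numbers i hcsuf hlen1
        cases hfo : foldOpt (PySem.List.pyRange 1 ((pvN pi - i : Nat) : Int) 1)
            (pvCA pi numbers i) (pvHA pi numbers i) none with
        | none =>
          have hnoq := (foldOpt_none_iff _ _ _).mp hfo
          have hMi : pvM pi numbers i = PySem.Str.len pi + 1 := by
            rcases foldMin_cases (pvLens pi numbers) (pvCB pi numbers i) (pvGB pi numbers i)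
                (PySem.Str.len pi + 1) with hcase | ⟨L, hLm, hcL, hcase⟩
            · rw [hrec0]; exact hcase
            · exfalso
              obtain ⟨hLpos, hLle, hj1, hj2⟩ := hqB L hLm hcL
              rcases eq_or_lt_of_le hj2 with heq | hlt
              · exact hfull L hLm hcL heq
              · have hmemr : L ∈ PySem.List.pyRange 1 ((pvN pi - i : Nat) : Int) 1 :=
                  (PySem.List.mem_pyRange_one).mpr ⟨by omega, by omega⟩
                have hcA : pvCA pi numbers i L = true := ((pvCB_iff pi numbers i L).mp hcL).2
                have hIHj := hIH (i + L.toNat) hj1 hlt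
                rcases hIHj.2.1 with htile | huntile
                · have hhA : pvHA pi numbers i L = pvM pi numbers (i + L.toNat) - 1 := by
                    simp only [pvHA]
                    rw [hIHj.2.2, if_pos htile]
                  refine hnoq L hmemr ⟨hcA, ?_⟩
                  rw [hhA]
                  have := hIHj.1
                  omega
                · have hle := foldMin_le_init (pvLens pi numbers) (pvCB pi numbers i)
                    (pvGB pi numbers i) (PySem.Str.len pi + 1)
                  rw [hcase] at hle
                  simp only [pvGB] at hle
                  rw [huntile] at hle
                  omega
          refine ⟨by rw [hMi, hnpi]; omega, Or.inr hMi, ?_⟩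
          rw [hfo] at hVfold
          rw [hVfold, hMi, if_neg (by rw [hnpi]; omega)]
        | some m' =>
          rcases foldOpt_cases _ _ _ _ _ hfo with hbad | ⟨idx0, hidx0r, hcA0, hhpos0, hm'⟩
          · simp at hbad
          have hb0 := (PySem.List.mem_pyRange_one).mp hidx0r
          have hj0a : i < i + idx0.toNat := by omega
          have hj0b : i + idx0.toNat < pvN pi := by omega
          have hIH0 := hIH (i + idx0.toNat) hj0a hj0b
          have htile0 : pvM pi numbers (i + idx0.toNat)
              ≤ PySem.Str.len pi - ((i + idx0.toNat : Nat) : Int) := by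
            by_contra hnt
            have hA1 : pvHA pi numbers i idx0 = -1 := by
              simp only [pvHA]
              rw [hIH0.2.2, if_neg hnt]
            rw [hA1] at hhpos0
            omega
          have hm'v : m' = pvM pi numbers (i + idx0.toNat) - 1 := by
            rw [hm']
            simp only [pvHA]
            rw [hIH0.2.2, if_pos htile0]
          have hm'0 : 0 ≤ m' := by
            have := hIH0.1
            omega
          have hm'le : m' ≤ PySem.Str.len pi - ((i + idx0.toNat : Nat) : Int) - 1 := by omega
          have hslen : PySem.Str.len
              (PySem.Str.slice pi (some (i : Int)) (some ((i : Int) + idx0))) = idx0 :=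
            len_slice_mid pi i idx0 (by omega) (by omega)
          have hsmem : PySem.Str.slice pi (some (i : Int)) (some ((i : Int) + idx0)) ∈ numbers := by
            have h1 := (PySem.Set.contains_iff _ _).mp hcA0
            rw [pvW] at h1
            exact (PySem.Set.mem_ofList _ _).mp h1
          have hLmem0 : idx0 ∈ pvLens pi numbers :=
            (mem_lens pi numbers idx0).mpr ⟨_, hsmem, hslen, by omega, by rw [hnpi]; omega⟩
          have hcB0 : pvCB pi numbers i idx0 = true :=
            (pvCB_iff pi numbers i idx0).mpr ⟨by rw [hnpi]; omega, hcA0⟩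
          have hub : pvM pi numbers i ≤ m' + 2 := by
            have h := foldMin_le (pvLens pi numbers) (pvCB pi numbers i) (pvGB pi numbers i)
              (PySem.Str.len pi + 1) idx0 hLmem0 hcB0
            rw [← hrec0] at h
            simp only [pvGB] at h
            omega
          have hub2 : pvM pi numbers i ≤ PySem.Str.len pi - (i : Int) := by omega
          have hlb : m' + 2 ≤ pvM pi numbers i := by
            rcases foldMin_cases (pvLens pi numbers) (pvCB pi numbers i) (pvGB pi numbers i)
                (PySem.Str.len pi + 1) with hcase | ⟨L1, hL1m, hcL1, hcase⟩
            · exfalso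
              have hx : pvM pi numbers i = PySem.Str.len pi + 1 := by rw [hrec0, hcase]
              rw [hx, hnpi] at hub2
              omega
            · obtain ⟨hL1pos, hL1le, hj11, hj12⟩ := hqB L1 hL1m hcL1
              have hMieq : pvM pi numbers i = pvGB pi numbers i L1 := by rw [hrec0, hcase]
              rcases eq_or_lt_of_le hj12 with heq | hlt1
              · exact (hfull L1 hL1m hcL1 heq).elim
              · have hIH1 := hIH (i + L1.toNat) hj11 hlt1
                rcases hIH1.2.1 with htile1 | hunt1
                · have hmemr1 : L1 ∈ PySem.List.pyRange 1 ((pvN pi - i : Nat) : Int) 1 :=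
                    (PySem.List.mem_pyRange_one).mpr ⟨by omega, by omega⟩
                  have hcA1 : pvCA pi numbers i L1 = true :=
                    ((pvCB_iff pi numbers i L1).mp hcL1).2
                  have hhA1 : pvHA pi numbers i L1 = pvM pi numbers (i + L1.toNat) - 1 := by
                    simp only [pvHA]
                    rw [hIH1.2.2, if_pos htile1]
                  have hgt : -1 < pvHA pi numbers i L1 := by
                    rw [hhA1]
                    have := hIH1.1
                    omega
                  have hle1 := foldOpt_le _ _ _ _ _ hfo L1 hmemr1 hcA1 hgt
                  rw [hhA1] at hle1
                  simp only [pvGB] at hMieq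
                  omega
                · exfalso
                  simp only [pvGB] at hMieq
                  rw [hunt1] at hMieq
                  omega
          have hMieq2 : pvM pi numbers i = m' + 2 := le_antisymm hub hlb
          refine ⟨by omega, Or.inl hub2, ?_⟩
          rw [hfo] at hVfold
          rw [hVfold]
          show (if ((pvN pi - i : Nat) : Int) < m' then (-1 : Int) else 1 + m') =
            (if pvM pi numbers i ≤ PySem.Str.len pi - (i : Int) then pvM pi numbers i - 1 else -1)
          rw [if_neg (show ¬ (((pvN pi - i : Nat) : Int) < m') from by
            rw [hnpi] at hm'le
            omega)]
          rw [if_pos hub2, hMieq2]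
          omega

-- ===== VERDICT (by name: the statement is the Claim_ definition above) =====
theorem numbersInPi_spec : Claim_equal_numbersInPi := by
  intro pi numbers _hdom
  unfold Spec_numbersInPi
  rw [numbersInPi_eq_V]
  by_cases hc : PySem.Set.contains (PySem.Set.ofList numbers) pi = true
  · have halt : numbersInPi_alt pi numbers = 0 := by
      simp only [numbersInPi_alt]
      rw [if_pos hc]
    rw [halt, V_succ]
    exact if_pos (show PySem.Set.contains (pvW numbers) pi = true from hc)
  · have halt : numbersInPi_alt pi numbers =
        (if PySem.List.pyGetD
              (bLoop pi (pvW numbers) (PySem.Str.len pi) (pvLens pi numbers) (pvN pi) [0]) 0 0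
            ≤ PySem.Str.len pi
         then PySem.List.pyGetD
              (bLoop pi (pvW numbers) (PySem.Str.len pi) (pvLens pi numbers) (pvN pi) [0]) 0 0 - 1
         else -1) := by
      simp only [numbersInPi_alt]
      rw [if_neg hc]
      rfl
    rw [halt]
    rcases Nat.eq_zero_or_pos (pvN pi) with h0 | hpos
    · have hlen : PySem.Str.len pi = (0 : Int) := by rw [hnpi_eq pi, h0]; rfl
      have hV : V (pvW numbers) (pvN pi + 1) pi = -1 := by
        rw [V_succ, if_neg (show ¬ PySem.Set.contains (pvW numbers) pi = true from hc)]
        rw [if_neg (by rw [hlen]; norm_num)]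
        rw [hlen, PySem.List.pyRange_one_eq_nil (by norm_num)]
        simp only [List.foldl_nil]
      rw [hV, h0]
      rw [show bLoop pi (pvW numbers) (PySem.Str.len pi) (pvLens pi numbers) 0 [0] = [0] from rfl]
      rw [show PySem.List.pyGetD ([0] : List Int) 0 0 = 0 from pyGetD_cons_zero 0 []]
      rw [if_pos (by rw [hlen])]
      norm_num
    · have hB := bLoop_eq_dpl pi numbers (pvN pi) le_rfl
      rw [Nat.sub_self] at hB
      rw [show pvDpl pi numbers 0 = [0] from rfl] at hB
      rw [hB]
      have hM0' : PySem.List.pyGetD (pvDpl pi numbers (pvN pi)) 0 0 = pvM pi numbers 0 := by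
        have h := getD_dpl pi numbers (pvN pi) 0 (by omega) le_rfl
        simpa using h
      rw [hM0']
      have hcx := (crux pi numbers 0 hpos).2.2
      have hsuf0 : pvSuf pi 0 = pi := by
        apply String.toList_inj.mp
        rw [toList_suf]
        simp
      rw [hsuf0, Nat.sub_zero] at hcx
      simp only [Nat.cast_zero, sub_zero] at hcx
      rw [hcx]
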